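-- pv_equiv track=rewrite | github.com/AzureCloudMonk/BookBuilder | book_builder/validate.py | parse_blocks_of_comments
-- ===== SOURCE A (Python) =====
-- def parse_comment_block(n, lines):
--     block = ""
--     while n < len(lines) and "//" in lines[n]:
--         block += lines[n].split("//")[1].strip() + " "
--         n += 1
--     return n, block
--
-- def parse_blocks_of_comments(listing):
--     result = []
--     lines = listing.splitlines()[1:] # Ignore slugline
--     n = 0
--     while n < len(lines):
--         if "//" in lines[n]:
--             n, block = parse_comment_block(n, lines)
--             result.append(block)
--         else:
--             n += 1
--     return result
-- ===== SOURCE B (Python) =====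
-- def parse_blocks_of_comments(listing):
--     result = []
--     current = None
--     for line in listing.splitlines()[1:]:
--         if "//" in line:
--             piece = line.split("//")[1].strip() + " "
--             current = piece if current is None else current + piece
--         else:
--             if current is not None:
--                 result.append(current)
--                 current = None
--     if current is not None:
--         result.append(current)
--     return result
-- ===== Notes on version B (the rewrite author's own statement) =====
-- stated objective: alternative
-- what changed: Replaced the index-based while loop with the parse_comment_block helper (a nested inner while) by a single linear fold over the lines that carries an Optional current-block accumulator and flushes it on non-comment lines and at the end.
import Mathlib
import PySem

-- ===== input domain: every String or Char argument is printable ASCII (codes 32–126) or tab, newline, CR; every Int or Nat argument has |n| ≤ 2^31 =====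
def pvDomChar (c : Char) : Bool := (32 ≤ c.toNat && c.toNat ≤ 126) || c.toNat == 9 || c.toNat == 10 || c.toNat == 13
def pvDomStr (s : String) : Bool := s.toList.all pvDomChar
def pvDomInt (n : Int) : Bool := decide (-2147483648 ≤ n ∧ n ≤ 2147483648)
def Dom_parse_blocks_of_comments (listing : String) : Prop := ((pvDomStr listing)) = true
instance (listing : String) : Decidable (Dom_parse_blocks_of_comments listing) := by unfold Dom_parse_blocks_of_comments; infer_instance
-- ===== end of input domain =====

-- B replaces A's index-based while loops by one linear fold with an Optional current-block
-- accumulator (same cost; a different decomposition).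

-- ===== PORT A =====
-- shared expression of both Pythons: line.split("//")[1].strip() + " "
-- (the [1] index is in range whenever "//" occurs in the line, which both callers check)
def pvCommentPiece (line : String) : String :=
  PySem.Str.strip (PySem.List.pyGetD ((PySem.Str.split? line "//").getD []) 1 "") ++ " "

-- the inner while of parse_comment_block; fuel is only a totality guard
-- (fuel = number of remaining indices, so the guard never cuts the loop short)
def pvCommentBlockLoop (lines : List String) (fuel n : Nat) (block : String) : Nat × String :=
  match fuel with
  | 0 => (n, block)
  | fuel + 1 =>
    if h : n < lines.length then
      if PySem.Str.isIn "//" lines[n] then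
        pvCommentBlockLoop lines fuel (n + 1) (block ++ pvCommentPiece lines[n])
      else (n, block)
    else (n, block)

def parse_comment_block (n : Nat) (lines : List String) : Nat × String :=
  pvCommentBlockLoop lines (lines.length - n) n ""

-- the outer while of parse_blocks_of_comments; fuel is only a totality guard
def pvBlocksLoop (lines : List String) (fuel n : Nat) (result : List String) : List String :=
  match fuel with
  | 0 => result
  | fuel + 1 =>
    if h : n < lines.length then
      if PySem.Str.isIn "//" lines[n] then
        let p := parse_comment_block n lines
        pvBlocksLoop lines fuel p.1 (result ++ [p.2])
      else pvBlocksLoop lines fuel (n + 1) result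
    else result

def parse_blocks_of_comments (listing : String) : List String :=
  let lines := PySem.List.slice (PySem.Str.splitlines listing) (some 1) none
  pvBlocksLoop lines lines.length 0 []

-- ===== PORT B =====
-- one fold step over a line: (result so far, current block or none)
def pvStepB (acc : List String × Option String) (line : String) : List String × Option String :=
  if PySem.Str.isIn "//" line then
    match acc.2 with
    | none => (acc.1, some (pvCommentPiece line))
    | some c => (acc.1, some (c ++ pvCommentPiece line))
  else
    match acc.2 with
    | some c => (acc.1 ++ [c], none)
    | none => (acc.1, none)

def parse_blocks_of_comments_alt (listing : String) : List String :=
  let lines := PySem.List.slice (PySem.Str.splitlines listing) (some 1) none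
  let p := lines.foldl pvStepB ([], none)
  match p.2 with
  | some c => p.1 ++ [c]
  | none => p.1

-- ===== PRECONDITION & SPEC =====
def Spec_parse_blocks_of_comments (listing : String) (out : List String) : Prop := out = parse_blocks_of_comments_alt listing
instance (listing : String) (out : List String) : Decidable (Spec_parse_blocks_of_comments listing out) := by unfold Spec_parse_blocks_of_comments; infer_instance

-- ===== CLAIM (what is proved, stated in full; the proofs are below) =====
def Claim_equal_parse_blocks_of_comments : Prop := ∀ (listing : String), Dom_parse_blocks_of_comments listing → Spec_parse_blocks_of_comments listing (parse_blocks_of_comments listing)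

-- ===== LEMMAS AND PROOFS =====

-- reference recursion over the list of lines (proof-side only)
def pvGrab : List String → String → String × List String
  | [], b => (b, [])
  | l :: ls, b =>
    if PySem.Str.isIn "//" l then pvGrab ls (b ++ pvCommentPiece l) else (b, l :: ls)

theorem pvGrab_len : ∀ (ls : List String) (b : String), (pvGrab ls b).2.length ≤ ls.length := by
  intro ls
  induction ls with
  | nil => intro b; simp [pvGrab]
  | cons l ls ih =>
    intro b
    by_cases hc : PySem.Str.isIn "//" l
    · simp only [pvGrab]
      rw [if_pos hc]
      exact Nat.le_succ_of_le (ih _)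
    · simp only [pvGrab]
      rw [if_neg hc]

def pvBlocks : List String → List String
  | [] => []
  | l :: ls =>
    if PySem.Str.isIn "//" l then
      (pvGrab ls (pvCommentPiece l)).1 :: pvBlocks (pvGrab ls (pvCommentPiece l)).2
    else pvBlocks ls
termination_by ls => ls.length
decreasing_by
  · have := pvGrab_len ls (pvCommentPiece l)
    simp only [List.length_cons]
    omega
  · simp only [List.length_cons]
    omega

def pvFin (p : List String × Option String) : List String :=
  match p.2 with
  | some c => p.1 ++ [c]
  | none => p.1

theorem pvCommentBlockLoop_grab (lines : List String) :
    ∀ (fuel n : Nat) (b : String), lines.length ≤ n + fuel →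
      (pvCommentBlockLoop lines fuel n b).2 = (pvGrab (lines.drop n) b).1 ∧
      lines.drop (pvCommentBlockLoop lines fuel n b).1 = (pvGrab (lines.drop n) b).2 ∧
      n ≤ (pvCommentBlockLoop lines fuel n b).1 := by
  intro fuel
  induction fuel with
  | zero =>
    intro n b hf
    have hd : lines.drop n = [] := List.drop_eq_nil_of_le (by omega)
    simp [pvCommentBlockLoop, hd, pvGrab]
  | succ fuel ih =>
    intro n b hf
    by_cases h : n < lines.length
    · have hd : lines.drop n = lines[n] :: lines.drop (n + 1) := List.drop_eq_getElem_cons h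
      by_cases hc : PySem.Str.isIn "//" lines[n]
      · have hrec := ih (n + 1) (b ++ pvCommentPiece lines[n]) (by omega)
        have hl : pvCommentBlockLoop lines (fuel + 1) n b =
            pvCommentBlockLoop lines fuel (n + 1) (b ++ pvCommentPiece lines[n]) := by
          simp only [pvCommentBlockLoop]
          rw [dif_pos h, if_pos hc]
        have hg : pvGrab (lines.drop n) b =
            pvGrab (lines.drop (n + 1)) (b ++ pvCommentPiece lines[n]) := by
          rw [hd]
          simp only [pvGrab]
          rw [if_pos hc]
        rw [hl, hg]
        exact ⟨hrec.1, hrec.2.1, by omega⟩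
      · have hl : pvCommentBlockLoop lines (fuel + 1) n b = (n, b) := by
          simp only [pvCommentBlockLoop]
          rw [dif_pos h, if_neg hc]
        have hg : pvGrab (lines.drop n) b = (b, lines.drop n) := by
          rw [hd]
          simp only [pvGrab]
          rw [if_neg hc]
        rw [hl, hg]
        exact ⟨rfl, rfl, le_refl n⟩
    · have hd : lines.drop n = [] := List.drop_eq_nil_of_le (by omega)
      have hl : pvCommentBlockLoop lines (fuel + 1) n b = (n, b) := by
        simp only [pvCommentBlockLoop]
        rw [dif_neg h]
      rw [hl, hd]
      simp [pvGrab]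

theorem pvBlocksLoop_blocks (lines : List String) :
    ∀ (fuel n : Nat) (result : List String), lines.length ≤ n + fuel →
      pvBlocksLoop lines fuel n result = result ++ pvBlocks (lines.drop n) := by
  intro fuel
  induction fuel with
  | zero =>
    intro n result hf
    have hd : lines.drop n = [] := List.drop_eq_nil_of_le (by omega)
    simp [pvBlocksLoop, hd, pvBlocks]
  | succ fuel ih =>
    intro n result hf
    by_cases h : n < lines.length
    · have hd : lines.drop n = lines[n] :: lines.drop (n + 1) := List.drop_eq_getElem_cons h
      by_cases hc : PySem.Str.isIn "//" lines[n]
      · obtain ⟨k, hk⟩ : ∃ k, lines.length - n = k + 1 := ⟨lines.length - n - 1, by omega⟩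
        have hp : parse_comment_block n lines =
            pvCommentBlockLoop lines k (n + 1) (pvCommentPiece lines[n]) := by
          unfold parse_comment_block
          rw [hk]
          simp only [pvCommentBlockLoop]
          rw [dif_pos h, if_pos hc]
          simp
        have hg := pvCommentBlockLoop_grab lines k (n + 1) (pvCommentPiece lines[n]) (by omega)
        have hadv : n + 1 ≤ (parse_comment_block n lines).1 := by
          rw [hp]; exact hg.2.2
        have hl : pvBlocksLoop lines (fuel + 1) n result =
            pvBlocksLoop lines fuel (parse_comment_block n lines).1
              (result ++ [(parse_comment_block n lines).2]) := by
          simp only [pvBlocksLoop]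
          rw [dif_pos h, if_pos hc]
        rw [hl, ih _ _ (by omega), hd]
        simp only [pvBlocks]
        rw [if_pos hc]
        rw [hp, hg.1, hg.2.1]
        simp
      · have hl : pvBlocksLoop lines (fuel + 1) n result =
            pvBlocksLoop lines fuel (n + 1) result := by
          simp only [pvBlocksLoop]
          rw [dif_pos h, if_neg hc]
        rw [hl, ih _ _ (by omega), hd]
        simp only [pvBlocks]
        rw [if_neg hc]
    · have hd : lines.drop n = [] := List.drop_eq_nil_of_le (by omega)
      have hl : pvBlocksLoop lines (fuel + 1) n result = result := by
        simp only [pvBlocksLoop]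
        rw [dif_neg h]
      rw [hl, hd]
      simp [pvBlocks]

theorem pvFold_blocks : ∀ (ls : List String) (res : List String) (cur : Option String),
    pvFin (ls.foldl pvStepB (res, cur)) =
      res ++ (match cur with
              | none => pvBlocks ls
              | some c => (pvGrab ls c).1 :: pvBlocks (pvGrab ls c).2) := by
  intro ls
  induction ls with
  | nil =>
    intro res cur
    cases cur <;> simp [pvFin, pvGrab, pvBlocks]
  | cons l ls ih =>
    intro res cur
    by_cases hc : PySem.Str.isIn "//" l
    · cases cur with
      | none =>
        simp only [List.foldl_cons, pvStepB]
        rw [if_pos hc, ih]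
        simp only [pvBlocks]
        rw [if_pos hc]
      | some c =>
        simp only [List.foldl_cons, pvStepB]
        rw [if_pos hc, ih]
        simp only [pvGrab]
        rw [if_pos hc]
    · cases cur with
      | none =>
        simp only [List.foldl_cons, pvStepB]
        rw [if_neg hc, ih]
        simp only [pvBlocks]
        rw [if_neg hc]
      | some c =>
        simp only [List.foldl_cons, pvStepB]
        rw [if_neg hc, ih]
        have hb : pvBlocks (l :: ls) = pvBlocks ls := by
          simp only [pvBlocks]; rw [if_neg hc]
        simp only [pvGrab]
        rw [if_neg hc]
        simp [hb]

-- ===== VERDICT (by name: the statement is the Claim_ definition above) =====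
theorem parse_blocks_of_comments_spec : Claim_equal_parse_blocks_of_comments := by
  intro listing _
  unfold Spec_parse_blocks_of_comments parse_blocks_of_comments parse_blocks_of_comments_alt
  rw [pvBlocksLoop_blocks _ _ 0 [] (by omega)]
  have := pvFold_blocks (PySem.List.slice (PySem.Str.splitlines listing) (some 1) none) [] none
  simp only [pvFin] at this
  simp [this]
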